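-- pv_equiv track=rewrite | github.com/CMU15-112/lecture_demos_qatar | week08/sets/SetsCT.py | ct1
-- ===== SOURCE A (Python) =====
-- def ct1(n):
--     s, t = set(), set()
--     while (n > 0):
--         (d, n) = (n%10, n//10)
--         if (d in t): t.remove(d)
--         elif (d in s): t.add(d)
--         s.add(d)
--     return sorted(t)
-- ===== SOURCE B (Python) =====
-- def ct1(n):
--     # count-then-filter: extract digits, count occurrences, keep even counts
--     digits = []
--     while n > 0:
--         digits.append(n % 10)
--         n //= 10
--     counts = {}
--     for d in digits:
--         counts[d] = counts.get(d, 0) + 1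
--     return sorted(d for d in counts if counts[d] % 2 == 0)
-- ===== Notes on version B (the rewrite author's own statement) =====
-- stated objective: simpler
-- what changed: Replaces the incremental two-set toggle invariant with a plain count-then-filter decomposition: extract the digit list, build a frequency dict, keep the digits whose count is even, sort.
import Mathlib
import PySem

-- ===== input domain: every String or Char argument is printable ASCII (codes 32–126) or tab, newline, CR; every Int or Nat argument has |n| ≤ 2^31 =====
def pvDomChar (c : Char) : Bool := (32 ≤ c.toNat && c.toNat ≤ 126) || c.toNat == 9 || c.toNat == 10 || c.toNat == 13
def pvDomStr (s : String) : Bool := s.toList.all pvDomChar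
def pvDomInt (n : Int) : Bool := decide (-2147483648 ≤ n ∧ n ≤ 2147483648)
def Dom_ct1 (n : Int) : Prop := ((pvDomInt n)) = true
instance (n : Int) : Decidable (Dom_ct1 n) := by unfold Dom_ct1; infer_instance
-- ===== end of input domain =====

-- B replaces A's incremental two-set toggle invariant with a count-then-filter
-- decomposition (digit list -> frequency dict -> keep even counts -> sort); objective: simpler.


-- ===== PORT A =====
-- the while loop of A, carrying the two sets s and t
def ct1Loop (n : Int) (s t : PySem.Set Int) : PySem.Set Int :=
  if 0 < n then
    let d := PySem.Int.mod n 10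
    let n' := PySem.Int.floordiv n 10
    -- 't.remove(d)' runs only under 'd in t', where it equals discard (no KeyError possible)
    let t' := if PySem.Set.contains t d then PySem.Set.discard t d
              else if PySem.Set.contains s d then PySem.Set.add t d else t
    ct1Loop n' (PySem.Set.add s d) t'
  else t
termination_by n.toNat
decreasing_by
  have h10 : PySem.Int.floordiv n 10 = n / 10 := PySem.Int.floordiv_eq_ediv_of_pos (by norm_num)
  omega

def ct1 (n : Int) : List Int :=
  PySem.List.sorted (ct1Loop n PySem.Set.empty PySem.Set.empty) (fun x => x) false

-- ===== PORT B =====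
-- B's digit-extraction while loop (appends n % 10, then n //= 10)
def ct1DigitsLoop (n : Int) (acc : List Int) : List Int :=
  if 0 < n then ct1DigitsLoop (PySem.Int.floordiv n 10) (acc ++ [PySem.Int.mod n 10])
  else acc
termination_by n.toNat
decreasing_by
  have h10 : PySem.Int.floordiv n 10 = n / 10 := PySem.Int.floordiv_eq_ediv_of_pos (by norm_num)
  omega

def ct1_alt (n : Int) : List Int :=
  let digits := ct1DigitsLoop n []
  -- counts[d] = counts.get(d, 0) + 1
  let counts := digits.foldl (fun d x => d.insert x (d.getD x 0 + 1)) PySem.Dict.empty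
  PySem.List.sorted
    ((PySem.Dict.keys counts).filter (fun d => decide (PySem.Int.mod (counts.getD d 0) 2 = 0)))
    (fun x => x) false

-- ===== PRECONDITION & SPEC =====
def Spec_ct1 (n : Int) (out : List Int) : Prop := out = ct1_alt n
instance (n : Int) (out : List Int) : Decidable (Spec_ct1 n out) := by unfold Spec_ct1; infer_instance

-- ===== CLAIM (what is proved, stated in full; the proofs are below) =====
def Claim_equal_ct1 : Prop := ∀ (n : Int), Dom_ct1 n → Spec_ct1 n (ct1 n)

-- ===== LEMMAS AND PROOFS =====

-- the digit list of n (head = least significant digit), an abbreviation used only in proofs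
def ct1Digits (n : Int) : List Int :=
  if 0 < n then PySem.Int.mod n 10 :: ct1Digits (PySem.Int.floordiv n 10) else []
termination_by n.toNat
decreasing_by
  have h10 : PySem.Int.floordiv n 10 = n / 10 := PySem.Int.floordiv_eq_ediv_of_pos (by norm_num)
  omega

lemma ct1DigitsLoop_eq (n : Int) : ∀ acc, ct1DigitsLoop n acc = acc ++ ct1Digits n := by
  induction n using ct1Digits.induct with
  | case1 n hn ih =>
      intro acc
      rw [ct1DigitsLoop, if_pos hn, ct1Digits, if_pos hn, ih, List.append_assoc]
      rfl
  | case2 n hn =>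
      intro acc
      rw [ct1DigitsLoop, if_neg hn, ct1Digits, if_neg hn, List.append_nil]

-- A's loop body as a step function over one digit
def ct1Step (p : PySem.Set Int × PySem.Set Int) (d : Int) : PySem.Set Int × PySem.Set Int :=
  (PySem.Set.add p.1 d,
   if PySem.Set.contains p.2 d then PySem.Set.discard p.2 d
   else if PySem.Set.contains p.1 d then PySem.Set.add p.2 d else p.2)

lemma ct1Loop_eq_fold (n : Int) : ∀ s t,
    ct1Loop n s t = (List.foldl ct1Step (s, t) (ct1Digits n)).2 := by
  induction n using ct1Digits.induct with
  | case1 n hn ih =>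
      intro s t
      rw [ct1Loop, if_pos hn, ct1Digits, if_pos hn, List.foldl_cons, ih]
      rfl
  | case2 n hn =>
      intro s t
      rw [ct1Loop, if_neg hn, ct1Digits, if_neg hn, List.foldl_nil]

lemma mem_fold_t (L : List Int) : ∀ (s t : PySem.Set Int),
    (∀ x ∈ t, x ∈ s) →
    ∀ x, (x ∈ (List.foldl ct1Step (s, t) L).2 ↔
      (if x ∈ s then (x ∈ t ↔ L.count x % 2 = 0)
       else x ∈ L ∧ L.count x % 2 = 0)) := by
  induction L with
  | nil =>
      intro s t hsub x
      simp only [List.foldl_nil, List.count_nil]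
      by_cases hxs : x ∈ s
      · simp [hxs]
      · have hxt : x ∉ t := fun h => hxs (hsub x h)
        simp [hxs, hxt]
  | cons d rest ih =>
      intro s t hsub x
      rw [List.foldl_cons]
      have hstep : ct1Step (s, t) d =
          (PySem.Set.add s d,
           if PySem.Set.contains t d then PySem.Set.discard t d
           else if PySem.Set.contains s d then PySem.Set.add t d else t) := rfl
      rw [hstep]
      have hsub' : ∀ y ∈ (if PySem.Set.contains t d then PySem.Set.discard t d
           else if PySem.Set.contains s d then PySem.Set.add t d else t), y ∈ PySem.Set.add s d := by
        intro y hy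
        split_ifs at hy with h1 h2
        · exact (PySem.Set.mem_add _ _ _).2 (Or.inl (hsub y ((PySem.Set.mem_discard _ _ _).1 hy).1))
        · rcases (PySem.Set.mem_add _ _ _).1 hy with h | h
          · exact (PySem.Set.mem_add _ _ _).2 (Or.inl (hsub y h))
          · exact (PySem.Set.mem_add _ _ _).2 (Or.inr h)
        · exact (PySem.Set.mem_add _ _ _).2 (Or.inl (hsub y hy))
      rw [ih _ _ hsub' x]
      by_cases hxd : x = d
      · subst hxd
        have hxs' : x ∈ PySem.Set.add s x := (PySem.Set.mem_add _ _ _).2 (Or.inr rfl)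
        rw [if_pos hxs', List.count_cons_self]
        by_cases hxt : x ∈ t
        · have hc : PySem.Set.contains t x = true := (PySem.Set.contains_iff _ _).2 hxt
          rw [if_pos hc]
          have hnd : x ∉ PySem.Set.discard t x := by
            intro h; exact ((PySem.Set.mem_discard _ _ _).1 h).2 rfl
          have hxs : x ∈ s := hsub x hxt
          rw [if_pos hxs]
          simp only [hnd, hxt, true_iff, false_iff]
          omega
        · have hc : ¬ (PySem.Set.contains t x = true) :=
            fun h => hxt ((PySem.Set.contains_iff _ _).1 h)
          rw [if_neg hc]
          by_cases hxs : x ∈ s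
          · have hcs : PySem.Set.contains s x = true := (PySem.Set.contains_iff _ _).2 hxs
            rw [if_pos hcs]
            have hxa : x ∈ PySem.Set.add t x := (PySem.Set.mem_add _ _ _).2 (Or.inr rfl)
            rw [if_pos hxs]
            simp only [hxa, hxt, true_iff, false_iff]
            omega
          · have hcs : ¬ (PySem.Set.contains s x = true) :=
              fun h => hxs ((PySem.Set.contains_iff _ _).1 h)
            rw [if_neg hcs, if_neg hxs]
            simp only [hxt, false_iff, List.mem_cons, true_or, true_and]
            omega
      · -- x ≠ d : the step changes nothing about x
        have h1 : (x ∈ PySem.Set.add s d) ↔ x ∈ s := by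
          rw [PySem.Set.mem_add]; simp [hxd]
        have h2 : (x ∈ (if PySem.Set.contains t d then PySem.Set.discard t d
                  else if PySem.Set.contains s d then PySem.Set.add t d else t)) ↔ x ∈ t := by
          split_ifs with ha hb
          · rw [PySem.Set.mem_discard]; simp [hxd]
          · rw [PySem.Set.mem_add]; simp [hxd]
          · exact Iff.rfl
        rw [List.count_cons_of_ne (Ne.symm hxd)]
        by_cases hxs : x ∈ s
        · rw [if_pos (h1.2 hxs), if_pos hxs, h2]
        · rw [if_neg (fun h => hxs (h1.1 h)), if_neg hxs]
          simp [List.mem_cons, hxd]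

lemma nodup_fold_t (L : List Int) : ∀ (s t : PySem.Set Int), t.Nodup →
    (List.foldl ct1Step (s, t) L).2.Nodup := by
  induction L with
  | nil => intro s t h; simpa using h
  | cons d rest ih =>
      intro s t h
      rw [List.foldl_cons]
      apply ih
      show (if PySem.Set.contains t d then PySem.Set.discard t d
            else if PySem.Set.contains s d then PySem.Set.add t d else t).Nodup
      split_ifs
      · exact PySem.Set.nodup_discard _ _ h
      · exact PySem.Set.nodup_add _ _ h
      · exact h

lemma int_mod_two_cast (k : Nat) : PySem.Int.mod (k : Int) 2 = 0 ↔ k % 2 = 0 := by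
  rw [PySem.Int.mod_eq_emod_of_pos (by norm_num)]
  omega

theorem ct1_spec : Claim_equal_ct1 := by
  intro n _
  unfold Spec_ct1 ct1 ct1_alt
  simp only [ct1DigitsLoop_eq n [], List.nil_append]
  have hA := ct1Loop_eq_fold n PySem.Set.empty PySem.Set.empty
  have hknd : (List.foldl (fun d x => d.insert x (d.getD x 0 + 1))
      (PySem.Dict.empty : PySem.Dict Int Int) (ct1Digits n)).keys.Nodup := by
    apply PySem.Dict.nodup_keys_foldl_insert
    exact PySem.Dict.nodup_keys_empty
  apply PySem.List.sorted_eq_sorted_of_perm _ _ _ (fun a b h => h)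
  apply (List.perm_ext_iff_of_nodup ?_ ?_).2
  · intro x
    rw [hA, mem_fold_t (ct1Digits n) PySem.Set.empty PySem.Set.empty (by intro y h; cases h) x]
    simp only [List.mem_filter, PySem.Dict.keys_foldl_insert, PySem.Dict.getD_foldl_insert_add_one,
      PySem.Dict.keys_empty, PySem.Dict.getD_empty, PySem.Set.update_nil_left, PySem.Set.mem_ofList,
      zero_add, decide_eq_true_eq, int_mod_two_cast, PySem.Set.empty, List.not_mem_nil, if_false]
  · rw [hA]
    exact nodup_fold_t (ct1Digits n) _ _ List.nodup_nil
  · exact List.Nodup.filter _ hknd
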